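-- pv_equiv track=rewrite | github.com/DaniilBaldin/Python_projects | var-counter/variations.py | combinations_var
-- ===== SOURCE A (Python) =====
-- def combinations_var(string):
--     """
--     Use cycle to generate list of
--     all variants with dots inside.
--      """
--     i = 0   # create starting point
--     combinations = []   # create empty list to save results
--
--     while i.bit_length() < len(string):     # run while bit. number lesser than string size
--         current_var = []    # create empty list to save current variant
--         for item_number, item in enumerate(string):     # create loop for enumerated items
--             current_var.append(item)      # append items of string to temporary list
--             if (2**item_number) & i:    # find where to place dots
--                 current_var.append('.')     # append dots to selected positions
--         i += 1  # counter
--         combinations.append(''.join(current_var))   # append results of cycle to initial empty list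
--     return combinations
-- ===== SOURCE B (Python) =====
-- def combinations_var(string):
--     """
--     Generate all dot-insertion variants by incremental doubling:
--     for each new character, keep each existing variant once plain
--     and once with a dot before the new character.
--     """
--     if not string:
--         return []
--     combos = [string[0]]
--     for c in string[1:]:
--         combos = [v + c for v in combos] + [v + '.' + c for v in combos]
--     return combos
-- ===== Notes on version B (the rewrite author's own statement) =====
-- stated objective: alternative
-- what changed: Replaces A's per-variant integer bit-mask enumeration (a while loop over counters i with an inner scan deciding each dot from a bit of i) by incremental doubling: start from the first character and, for each subsequent character, duplicate the variant list once plain and once with a dot before it.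
import Mathlib
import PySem

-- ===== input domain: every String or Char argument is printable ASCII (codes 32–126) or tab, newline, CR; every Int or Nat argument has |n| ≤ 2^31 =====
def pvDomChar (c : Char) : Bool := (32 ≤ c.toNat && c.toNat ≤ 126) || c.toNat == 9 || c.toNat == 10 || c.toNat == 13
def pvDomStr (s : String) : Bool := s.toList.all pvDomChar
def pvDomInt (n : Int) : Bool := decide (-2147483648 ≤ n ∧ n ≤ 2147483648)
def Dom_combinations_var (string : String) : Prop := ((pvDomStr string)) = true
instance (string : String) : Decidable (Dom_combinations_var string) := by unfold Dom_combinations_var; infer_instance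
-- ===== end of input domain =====

-- B replaces A's per-variant bit-mask while-loop by incremental doubling of the variant
-- list, one character at a time (objective: alternative decomposition, same output order).

-- ===== PORT A =====
-- Python int.bit_length()
def pyBitLength (i : Nat) : Nat := if i = 0 then 0 else Nat.log2 i + 1

-- inner for-loop: enumerate(string), append item, append '.' where (2**item_number) & i
-- is truthy; `(2**k) & i != 0` is exactly `Nat.testBit i k`.
def cvVariant (s : List Char) (i : Nat) : List Char :=
  (s.zipIdx).foldl
    (fun acc p => acc ++ [p.1] ++ (if Nat.testBit i p.2 then ['.'] else [])) []

-- the while-loop, fuel-guarded for totality (fuel 2^len is enough: i stops at 2^(len-1))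
def cvLoop (s : List Char) : Nat → Nat → List String → List String
  | 0, _, acc => acc
  | fuel+1, i, acc =>
    if pyBitLength i < s.length then
      cvLoop s fuel (i+1) (acc ++ [String.mk (cvVariant s i)])
    else acc

def combinations_var (string : String) : List String :=
  cvLoop string.toList (2 ^ string.toList.length) 0 []

-- ===== PORT B =====
-- combos = [v + c for v in combos] + [v + '.' + c for v in combos]  (over List Char)
def altStep (acc : List (List Char)) (c : Char) : List (List Char) :=
  acc.map (fun v => v ++ [c]) ++ acc.map (fun v => v ++ ['.', c])

def combinations_var_alt (string : String) : List String :=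
  match string.toList with
  | [] => []
  | c :: rest => (rest.foldl altStep [[c]]).map String.mk

-- ===== PRECONDITION & SPEC =====
def Spec_combinations_var (string : String) (out : List String) : Prop := out = combinations_var_alt string
instance (string : String) (out : List String) : Decidable (Spec_combinations_var string out) := by unfold Spec_combinations_var; infer_instance

-- ===== CLAIM (what is proved, stated in full; the proofs are below) =====
def Claim_equal_combinations_var : Prop := ∀ (string : String), Dom_combinations_var string → Spec_combinations_var string (combinations_var string)

-- ===== LEMMAS AND PROOFS =====

-- canonical "gap before each character" form of a variant: for t = tail of the string,
-- Gv t i puts a dot before t[j] iff bit j of i is set.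
def Gv : List Char → Nat → List Char
  | [], _ => []
  | a :: t, i => (if i % 2 = 1 then ['.'] else []) ++ a :: Gv t (i / 2)

lemma cvFoldl_acc (i : Nat) :
    ∀ (l : List (Char × Nat)) (acc : List Char),
      l.foldl (fun acc p => acc ++ [p.1] ++ (if Nat.testBit i p.2 then ['.'] else [])) acc
      = acc ++ l.foldl (fun acc p => acc ++ [p.1] ++ (if Nat.testBit i p.2 then ['.'] else [])) [] := by
  intro l
  induction l with
  | nil => simp
  | cons p l ih =>
    intro acc
    simp only [List.foldl_cons]
    rw [ih, ih ([] ++ [p.1] ++ _)]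
    simp

lemma cv_tail_eq_Gv :
    ∀ (t : List Char) (k i : Nat), i / 2 ^ (k + t.length) % 2 = 0 →
      (if Nat.testBit i k then ['.'] else []) ++
        (t.zipIdx (k+1)).foldl
          (fun acc p => acc ++ [p.1] ++ (if Nat.testBit i p.2 then ['.'] else [])) []
      = Gv t (i / 2 ^ k) := by
  intro t
  induction t with
  | nil =>
    intro k i h
    simp only [List.length_nil, Nat.add_zero] at h
    simp [Gv, Nat.testBit_eq_decide_div_mod_eq, h]
  | cons a t ih =>
    intro k i h
    rw [List.zipIdx_cons, List.foldl_cons, cvFoldl_acc]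
    have hrec := ih (k+1) i (by
      have : k + 1 + t.length = k + (a :: t).length := by simp; omega
      rw [this]; exact h)
    rw [Gv]
    have hdiv : i / 2 ^ (k+1) = i / 2 ^ k / 2 := by
      rw [Nat.pow_succ, Nat.div_div_eq_div_mul]
    have hbit : Nat.testBit i k = decide (i / 2 ^ k % 2 = 1) := Nat.testBit_eq_decide_div_mod_eq
    rw [hbit]
    rw [hdiv] at hrec
    rw [← hrec]
    simp

-- cvVariant on a nonempty string, for i below 2^(tail length), is c :: Gv tail i
lemma cvVariant_eq (c : Char) (rest : List Char) (i : Nat) (hi : i < 2 ^ rest.length) :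
    cvVariant (c :: rest) i = c :: Gv rest i := by
  unfold cvVariant
  rw [List.zipIdx_cons, List.foldl_cons, cvFoldl_acc]
  have h0 : i / 2 ^ rest.length = 0 := Nat.div_eq_of_lt hi
  have h := cv_tail_eq_Gv rest 0 i (by simp [h0])
  simp only [Nat.pow_zero, Nat.div_one] at h
  rw [← h]
  simp

-- Gv ignores bits at and above the length
lemma Gv_add_pow : ∀ (t : List Char) (i m : Nat), Gv t (i + 2 ^ t.length * m) = Gv t i := by
  intro t
  induction t with
  | nil => intro i m; rfl
  | cons a t ih =>
    intro i m
    have h2 : 2 ^ (a :: t).length * m = 2 * (2 ^ t.length * m) := by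
      simp [List.length_cons, Nat.pow_succ]; ring
    rw [Gv, Gv, h2, Nat.add_mul_mod_self_left i 2 (2 ^ t.length * m),
        Nat.add_mul_div_left i _ (by norm_num : (0:ℕ) < 2), ih]

lemma Gv_append (d : Char) :
    ∀ (t : List Char) (i : Nat),
      Gv (t ++ [d]) i = Gv t i ++ (if i / 2 ^ t.length % 2 = 1 then ['.', d] else [d]) := by
  intro t
  induction t with
  | nil =>
    intro i
    simp only [List.nil_append, Gv, List.length_nil, Nat.pow_zero, Nat.div_one]
    split_ifs <;> rfl
  | cons a t ih =>
    intro i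
    simp only [List.cons_append, Gv, ih (i / 2), List.length_cons]
    have : i / 2 / 2 ^ t.length = i / 2 ^ (t.length + 1) := by
      rw [Nat.div_div_eq_div_mul, ← Nat.pow_succ']
    rw [this]
    simp

-- B's doubling loop produces exactly the variants in A's binary-counter order
lemma alt_foldl_eq (c : Char) :
    ∀ (t : List Char),
      t.foldl altStep [[c]] = (List.range (2 ^ t.length)).map (fun i => c :: Gv t i) := by
  intro t
  induction t using List.reverseRecOn with
  | nil => simp [Gv]
  | append_singleton t d ih =>
    rw [List.foldl_append, ih, List.foldl_cons, List.foldl_nil]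
    unfold altStep
    rw [List.map_map, List.map_map]
    have hlen : (t ++ [d]).length = t.length + 1 := by simp
    have hp : (2:ℕ) ^ (t.length + 1) = 2 ^ t.length + 2 ^ t.length := by
      rw [Nat.pow_succ]; omega
    rw [hlen, hp, List.range_add, List.map_append, List.map_map]
    congr 1
    · apply List.map_congr_left
      intro i hi
      rw [List.mem_range] at hi
      have h0 : i / 2 ^ t.length = 0 := Nat.div_eq_of_lt hi
      simp [Function.comp, Gv_append, h0]
    · apply List.map_congr_left
      intro i hi
      rw [List.mem_range] at hi
      have hd : (2 ^ t.length + i) / 2 ^ t.length = 1 := by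
        rw [Nat.add_comm, Nat.add_div_right _ (Nat.two_pow_pos _), Nat.div_eq_of_lt hi]
      have hg : Gv t (2 ^ t.length + i) = Gv t i := by
        simpa [Nat.add_comm, Nat.mul_one] using Gv_add_pow t i 1
      simp [Function.comp, Gv_append, hd, hg]

-- A's while-condition, for a nonempty string
lemma bitLength_lt (i n : Nat) (hn : 1 ≤ n) : pyBitLength i < n ↔ i < 2 ^ (n - 1) := by
  unfold pyBitLength
  split_ifs with h
  · subst h
    constructor <;> intro _
    · exact Nat.two_pow_pos _
    · omega
  · rw [show Nat.log2 i + 1 < n ↔ Nat.log2 i < n - 1 by omega, Nat.log2_lt h]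

-- unrolling A's fuelled while-loop
lemma cvLoop_eq (s : List Char) (hn : 1 ≤ s.length) :
    ∀ (fuel i : Nat) (acc : List String), 2 ^ (s.length - 1) - i ≤ fuel →
      cvLoop s fuel i acc
        = acc ++ (List.range' i (2 ^ (s.length - 1) - i)).map (fun j => String.mk (cvVariant s j)) := by
  intro fuel
  induction fuel with
  | zero =>
    intro i acc h
    have : 2 ^ (s.length - 1) - i = 0 := Nat.le_zero.mp h
    simp [cvLoop, this]
  | succ fuel ih =>
    intro i acc h
    rw [cvLoop]
    split_ifs with hc
    · rw [bitLength_lt i s.length hn] at hc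
      rw [ih (i+1) _ (by omega)]
      have hm : 2 ^ (s.length - 1) - i = (2 ^ (s.length - 1) - (i+1)) + 1 := by omega
      rw [hm, List.range'_succ]
      simp
    · rw [bitLength_lt i s.length hn] at hc
      have : 2 ^ (s.length - 1) - i = 0 := by omega
      simp [this]

-- ===== VERDICT (by name: the statement is the Claim_ definition above) =====
theorem combinations_var_spec : Claim_equal_combinations_var := by
  intro string _
  unfold Spec_combinations_var combinations_var combinations_var_alt
  cases hs : string.toList with
  | nil => simp [cvLoop, pyBitLength]
  | cons c rest =>
    show cvLoop (c :: rest) (2 ^ (c :: rest).length) 0 []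
        = (rest.foldl altStep [[c]]).map String.mk
    have hn : 1 ≤ (c :: rest).length := by simp
    have hfuel : 2 ^ ((c :: rest).length - 1) - 0 ≤ 2 ^ (c :: rest).length := by
      have := Nat.pow_le_pow_right (by norm_num : 1 ≤ 2)
        (show (c :: rest).length - 1 ≤ (c :: rest).length by omega)
      omega
    rw [cvLoop_eq (c :: rest) hn _ 0 [] hfuel]
    rw [alt_foldl_eq c rest, List.map_map]
    have hlen : (c :: rest).length - 1 = rest.length := by simp
    rw [hlen, Nat.sub_zero, ← List.range_eq_range']
    apply List.map_congr_left
    intro i hi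
    rw [List.mem_range] at hi
    simp [Function.comp, cvVariant_eq c rest i hi]
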